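-- pv_equiv track=rewrite | github.com/fesiib/doc2slide-mapping | server/processData.py | fixSectionTitles
-- ===== SOURCE A (Python) =====
-- from string import ascii_lowercase, punctuation, digits
--
-- def fixSectionTitles(section_titles):
--     ret_titles = []
--
--     title_num = 0
--
--     last_section = None
--
--     def is_main_section(title):
--         if title[0] in digits or title.isupper() is True:
--             return True
--         return False
--
--
--     for title in section_titles:
--         if is_main_section(title) or last_section is None:
--             ret_titles.append(title)
--             last_section = title
--         else:
--             ret_titles.append(last_section)
--     return ret_titles
-- ===== SOURCE B (Python) =====
-- from string import digits
--
-- def fixSectionTitles(section_titles):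
--     def is_main_section(title):
--         if title[0] in digits or title.isupper() is True:
--             return True
--         return False
--
--     def anchor(i):
--         # last main section title at or before index i; falls back to the first title
--         for j in range(i, -1, -1):
--             if is_main_section(section_titles[j]):
--                 return section_titles[j]
--         return section_titles[0]
--
--     return [section_titles[i] if is_main_section(section_titles[i]) else anchor(i)
--             for i in range(len(section_titles))]
-- ===== Notes on version B (the rewrite author's own statement) =====
-- stated objective: alternative
-- what changed: A is a single stateful scan carrying a last_section variable; B is stateless: a per-index comprehension that fills each non-main slot by searching backwards for the nearest preceding main title (falling back to the first title).
import Mathlib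
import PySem

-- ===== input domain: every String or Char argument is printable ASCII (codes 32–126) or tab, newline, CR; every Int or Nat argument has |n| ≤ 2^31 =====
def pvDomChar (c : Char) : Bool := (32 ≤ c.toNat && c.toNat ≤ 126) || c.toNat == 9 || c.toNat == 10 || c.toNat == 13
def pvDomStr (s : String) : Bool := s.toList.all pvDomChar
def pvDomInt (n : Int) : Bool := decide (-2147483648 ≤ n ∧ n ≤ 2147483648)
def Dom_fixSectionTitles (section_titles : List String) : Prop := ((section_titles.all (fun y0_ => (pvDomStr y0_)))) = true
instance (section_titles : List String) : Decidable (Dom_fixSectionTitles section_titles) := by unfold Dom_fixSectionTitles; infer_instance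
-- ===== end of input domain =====

-- B replaces A's stateful last_section scan by a stateless per-index backwards search for
-- the nearest preceding main title (objective: alternative decomposition, same results).

-- hand port of str.isupper (no PySem primitive): at least one uppercase letter and no
-- lowercase letter; exact on the ASCII domain (Dom_), where these are the only cased chars
def pvIsUpperStr (s : String) : Bool :=
  s.toList.any (fun c => 'A' ≤ c && c ≤ 'Z') && s.toList.all (fun c => !('a' ≤ c && c ≤ 'z'))

-- `title[0] in digits or title.isupper()`; title[0] on "" raises IndexError in Python
-- (those inputs are excluded by Pre_); Char.isDigit is exactly membership in "0123456789"
def isMainSection (title : String) : Bool :=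
  match PySem.Str.pyGet? title 0 with
  | some c => c.isDigit || pvIsUpperStr title
  | none => false

-- ===== PORT A =====
def fixSectionTitles (section_titles : List String) : List String :=
  (section_titles.foldl
    (fun (st : List String × Option String) title =>
      if isMainSection title || st.2.isNone then (st.1 ++ [title], some title)
      else (st.1 ++ [st.2.getD title], st.2))   -- st.2 is some here; the getD default is never used
    ([], none)).1

-- ===== PORT B =====
-- `for j in range(i, -1, -1): if is_main(ts[j]): return ts[j]` then `return ts[0]`;
-- indices are always in range here, so list.getD is exact
def anchorB (section_titles : List String) : Nat → String
  | 0 => if isMainSection (section_titles.getD 0 "") then section_titles.getD 0 ""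
         else section_titles.getD 0 ""
  | j+1 => if isMainSection (section_titles.getD (j+1) "") then section_titles.getD (j+1) ""
           else anchorB section_titles j

def fixSectionTitles_alt (section_titles : List String) : List String :=
  (List.range section_titles.length).map
    (fun i => if isMainSection (section_titles.getD i "") then section_titles.getD i ""
              else anchorB section_titles i)

-- ===== PRECONDITION & SPEC =====
-- Pre_ excludes lists containing an empty title: there both A and B raise IndexError (title[0]).
def Pre_fixSectionTitles (section_titles : List String) : Prop := "" ∉ section_titles
instance (section_titles : List String) : Decidable (Pre_fixSectionTitles section_titles) := by
  unfold Pre_fixSectionTitles; infer_instance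

def pvWitness_fixSectionTitles : List String := ["1 Intro", "background", "RESULTS", "details"]

def Spec_fixSectionTitles (section_titles : List String) (out : List String) : Prop := out = fixSectionTitles_alt section_titles
instance (section_titles : List String) (out : List String) : Decidable (Spec_fixSectionTitles section_titles out) := by unfold Spec_fixSectionTitles; infer_instance

-- ===== CLAIM (what is proved, stated in full; the proofs are below) =====
def Claim_equal_fixSectionTitles : Prop := ∀ (section_titles : List String), Dom_fixSectionTitles section_titles → Pre_fixSectionTitles section_titles → Spec_fixSectionTitles section_titles (fixSectionTitles section_titles)

-- ===== LEMMAS AND PROOFS =====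

-- common recursive characterisation: the scan with an explicit last-section state
def pvG (last : Option String) : List String → List String
  | [] => []
  | t :: ts =>
    if isMainSection t || last.isNone then t :: pvG (some t) ts
    else last.getD t :: pvG last ts

theorem pvFoldA (ts : List String) : ∀ (acc : List String) (last : Option String),
    (ts.foldl
      (fun (st : List String × Option String) title =>
        if isMainSection title || st.2.isNone then (st.1 ++ [title], some title)
        else (st.1 ++ [st.2.getD title], st.2))
      (acc, last)).1 = acc ++ pvG last ts := by
  induction ts with
  | nil => intro acc last; simp [pvG]
  | cons t ts ih =>
    intro acc last
    by_cases h : (isMainSection t || last.isNone) = true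
    · simp only [pvG]
      rw [List.foldl_cons, if_pos h, if_pos h, ih]
      simp
    · simp only [pvG]
      rw [List.foldl_cons, if_neg h, if_neg h, ih]
      simp

-- the state A carries at position k, expressed through B's anchor
def pvLastOf (ts : List String) (k : Nat) : Option String :=
  if k = 0 then none else some (anchorB ts (k - 1))

theorem pvGetD_eq (ts : List String) (k : Nat) (hk : k < ts.length) :
    ts[k]?.getD "" = ts[k] := by rw [List.getElem?_eq_getElem hk]; rfl

theorem pvAnchor_self (ts : List String) (k : Nat) (hk : k < ts.length)
    (h : isMainSection ts[k] = true) : anchorB ts k = ts[k] := by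
  cases k with
  | zero => simp [anchorB, pvGetD_eq ts 0 hk, h]
  | succ j => simp [anchorB, pvGetD_eq ts (j+1) hk, h]

theorem pvAnchor_zero (ts : List String) (hk : 0 < ts.length) : anchorB ts 0 = ts[0] := by
  simp [anchorB, pvGetD_eq ts 0 hk]

theorem pvAnchor_step (ts : List String) (j : Nat) (hk : j + 1 < ts.length)
    (h : isMainSection ts[j+1] = false) : anchorB ts (j+1) = anchorB ts j := by
  simp [anchorB, pvGetD_eq ts (j+1) hk, h]

theorem pvMapG (n : Nat) : ∀ (ts : List String) (k : Nat), ts.length = k + n →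
    ((List.range' k n).map
      (fun i => if isMainSection (ts.getD i "") then ts.getD i ""
                else anchorB ts i)) = pvG (pvLastOf ts k) (ts.drop k) := by
  induction n with
  | zero =>
    intro ts k hlen
    rw [List.drop_eq_nil_of_le (by omega), List.range'_zero, List.map_nil]
    rfl
  | succ n ih =>
    intro ts k hlen
    have hk : k < ts.length := by omega
    have hdrop : ts.drop k = ts[k] :: ts.drop (k+1) := (List.getElem_cons_drop hk).symm
    have hgd : ts[k]?.getD "" = ts[k] := pvGetD_eq ts k hk
    have hih := ih ts (k+1) (by omega)
    rw [List.range'_succ, List.map_cons, hdrop]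
    by_cases hmain : isMainSection ts[k] = true
    · have hanch : anchorB ts k = ts[k] := pvAnchor_self ts k hk hmain
      have hlast : pvLastOf ts (k+1) = some ts[k] := by simp [pvLastOf, hanch]
      simp only [List.getD] at hih
      simp [pvG, hmain, hgd, hih, hlast]
    · have hmain' : isMainSection ts[k] = false := by simpa using hmain
      cases k with
      | zero =>
        have hanch0 : anchorB ts 0 = ts[0] := pvAnchor_zero ts hk
        have hlast1 : pvLastOf ts 1 = some ts[0] := by simp [pvLastOf, hanch0]
        simp only [List.getD] at hih
        simp [pvG, pvLastOf, hmain', hgd, hih, hlast1, hanch0]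
      | succ j =>
        have hstep : anchorB ts (j+1) = anchorB ts j := pvAnchor_step ts j hk hmain'
        have hlast : pvLastOf ts (j+1) = some (anchorB ts j) := by simp [pvLastOf]
        have hlast2 : pvLastOf ts (j+2) = some (anchorB ts j) := by simp [pvLastOf, hstep]
        simp only [List.getD] at hih
        simp [pvG, hmain', hgd, hih, hlast, hlast2, hstep]

theorem pvA_eq_G (ts : List String) : fixSectionTitles ts = pvG none ts := by
  unfold fixSectionTitles
  simpa using pvFoldA ts [] none

theorem pvB_eq_G (ts : List String) : fixSectionTitles_alt ts = pvG none ts := by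
  unfold fixSectionTitles_alt
  rw [List.range_eq_range']
  have h := pvMapG ts.length ts 0 (by omega)
  simpa [pvLastOf] using h

-- ===== VERDICT (by name: the statement is the Claim_ definition above) =====
theorem fixSectionTitles_spec : Claim_equal_fixSectionTitles := by
  intro ts _ _
  unfold Spec_fixSectionTitles
  rw [pvA_eq_G, pvB_eq_G]
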